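-- pv_equiv track=rewrite | github.com/DharmikPrajapati23/Compiler_Design | clr_lalr.py | transitions_str_labeled
-- ===== SOURCE A (Python) =====
-- from collections import defaultdict, deque
--
-- def transitions_str_labeled(merged_trans, merged_idx_to_label):
--     by_src = defaultdict(list)
--     for (i, X), j in merged_trans.items():
--         by_src[i].append((X, j))
--     lines = ["\nGOTO transitions (LALR labels):"]
--     for i in sorted(by_src.keys()):
--         moves = ", ".join(
--             f"on {X} -> I{merged_idx_to_label[j]}"
--             for X, j in sorted(by_src[i], key=lambda t: (t[0] != "$", str(t[0])))
--         )
--         lines.append(f"  I{merged_idx_to_label[i]}: {moves}")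
--     return "\n".join(lines)
-- ===== SOURCE B (Python) =====
-- def transitions_str_labeled(merged_trans, merged_idx_to_label):
--     lab = merged_idx_to_label
--
--     def moves_for(s):
--         pairs = sorted(((X, j) for (i, X), j in merged_trans.items() if i == s),
--                        key=lambda t: (t[0] != "$", t[0]))
--         return ", ".join(f"on {X} -> I{lab[j]}" for X, j in pairs)
--
--     sources = sorted({i for (i, X), j in merged_trans.items()})
--     return "\n".join(["\nGOTO transitions (LALR labels):"]
--                      + [f"  I{lab[s]}: {moves_for(s)}" for s in sources])
-- ===== Notes on version B (the rewrite author's own statement) =====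
-- stated objective: alternative
-- what changed: Replaces A's defaultdict single-pass grouping (accumulate lists per source, then sort the keys) by a dict-free decomposition: collect the distinct sources as a set, sort them, and for each source select its moves by a filtering pass over the items; trades one hash-grouping pass for one scan per group.
import Mathlib
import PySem

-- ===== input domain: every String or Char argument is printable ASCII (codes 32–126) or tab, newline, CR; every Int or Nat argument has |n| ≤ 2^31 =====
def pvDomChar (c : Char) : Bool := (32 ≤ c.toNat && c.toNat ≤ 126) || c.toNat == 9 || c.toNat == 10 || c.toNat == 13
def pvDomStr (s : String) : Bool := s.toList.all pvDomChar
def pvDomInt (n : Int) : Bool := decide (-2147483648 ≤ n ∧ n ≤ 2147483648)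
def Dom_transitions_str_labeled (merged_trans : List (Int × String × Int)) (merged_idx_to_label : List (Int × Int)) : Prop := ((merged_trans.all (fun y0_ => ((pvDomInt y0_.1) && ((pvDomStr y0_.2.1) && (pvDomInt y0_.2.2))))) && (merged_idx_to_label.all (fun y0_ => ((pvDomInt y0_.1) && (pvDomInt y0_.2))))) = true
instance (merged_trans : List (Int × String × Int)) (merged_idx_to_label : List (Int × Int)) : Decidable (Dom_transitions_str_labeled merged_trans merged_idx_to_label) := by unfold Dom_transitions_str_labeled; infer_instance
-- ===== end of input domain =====

-- B replaces A's defaultdict grouping by a dict-free decomposition (sorted set of sources,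
-- then a filtering pass per source); same cost class, no speed claim. Equivalence is on the
-- return value; neither version mutates its arguments.

-- Shared input decoding: the Python arguments ARE dicts; the assoc lists are read through
-- PySem.Dict (insertion order, last value wins on a duplicate key), as dict(...) would.
def pvMTDict (merged_trans : List (Int × String × Int)) : PySem.Dict (Int × String) Int :=
  PySem.Dict.ofList (merged_trans.map (fun t => ((t.1, t.2.1), t.2.2)))

-- merged_idx_to_label[j]; the default 0 is unreachable under Pre_ (a missing key is a
-- Python KeyError, excluded by Pre_).
def pvLabel (merged_idx_to_label : List (Int × Int)) (j : Int) : String :=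
  PySem.Int.toStr ((PySem.Dict.ofList merged_idx_to_label).getD j 0)

-- ===== PORT A =====
def transitions_str_labeled (merged_trans : List (Int × String × Int)) (merged_idx_to_label : List (Int × Int)) : String :=
  let ts := (pvMTDict merged_trans).items
  -- by_src = defaultdict(list); for (i, X), j in merged_trans.items(): by_src[i].append((X, j))
  let by_src := ts.foldl (fun d t => d.modify t.1.1 [] (fun l => l ++ [(t.1.2, t.2)])) PySem.Dict.empty
  let lines0 : List String := ["\nGOTO transitions (LALR labels):"]
  let lines := (PySem.List.sorted by_src.keys (fun i => i) false).foldl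
    (fun acc i =>
      let moves := PySem.Str.join ", "
        ((PySem.List.sorted2 (by_src.getD i []) (fun t => t.1 != "$") (fun t => t.1) false).map
          (fun t => "on " ++ t.1 ++ " -> I" ++ pvLabel merged_idx_to_label t.2))
      acc ++ ["  I" ++ pvLabel merged_idx_to_label i ++ ": " ++ moves]) lines0
  PySem.Str.join "\n" lines

-- ===== PORT B =====
-- moves_for(s): sort the pairs selected by a filtering pass, then format them
def pvMovesFor (ts : List ((Int × String) × Int)) (merged_idx_to_label : List (Int × Int)) (s : Int) : String :=
  PySem.Str.join ", "
    ((PySem.List.sorted2 ((ts.filter (fun t => t.1.1 == s)).map (fun t => (t.1.2, t.2)))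
        (fun t => t.1 != "$") (fun t => t.1) false).map
      (fun t => "on " ++ t.1 ++ " -> I" ++ pvLabel merged_idx_to_label t.2))

def transitions_str_labeled_alt (merged_trans : List (Int × String × Int)) (merged_idx_to_label : List (Int × Int)) : String :=
  let ts := (pvMTDict merged_trans).items
  let sources := PySem.List.sorted (PySem.Set.ofList (ts.map (fun t => t.1.1))) (fun i => i) false
  PySem.Str.join "\n"
    ("\nGOTO transitions (LALR labels):" ::
      sources.map (fun s => "  I" ++ pvLabel merged_idx_to_label s ++ ": " ++ pvMovesFor ts merged_idx_to_label s))

-- ===== PRECONDITION & SPEC =====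
-- Pre_ excludes exactly the inputs where A raises KeyError: a source i or a target j of some
-- transition that is not a key of merged_idx_to_label.
def Pre_transitions_str_labeled (merged_trans : List (Int × String × Int)) (merged_idx_to_label : List (Int × Int)) : Prop :=
  ∀ t ∈ merged_trans, t.1 ∈ merged_idx_to_label.map Prod.fst ∧ t.2.2 ∈ merged_idx_to_label.map Prod.fst
instance (merged_trans : List (Int × String × Int)) (merged_idx_to_label : List (Int × Int)) : Decidable (Pre_transitions_str_labeled merged_trans merged_idx_to_label) := by unfold Pre_transitions_str_labeled; infer_instance

def pvWitness_transitions_str_labeled : (List (Int × String × Int)) × (List (Int × Int)) :=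
  ([(0, "a", 1), (0, "$", 0), (1, "a", 0)], [(0, 5), (1, 7)])

def Spec_transitions_str_labeled (merged_trans : List (Int × String × Int)) (merged_idx_to_label : List (Int × Int)) (out : String) : Prop := out = transitions_str_labeled_alt merged_trans merged_idx_to_label
instance (merged_trans : List (Int × String × Int)) (merged_idx_to_label : List (Int × Int)) (out : String) : Decidable (Spec_transitions_str_labeled merged_trans merged_idx_to_label out) := by unfold Spec_transitions_str_labeled; infer_instance

-- ===== CLAIM (what is proved, stated in full; the proofs are below) =====
def Claim_equal_transitions_str_labeled : Prop := ∀ (merged_trans : List (Int × String × Int)) (merged_idx_to_label : List (Int × Int)), Dom_transitions_str_labeled merged_trans merged_idx_to_label → Pre_transitions_str_labeled merged_trans merged_idx_to_label → Spec_transitions_str_labeled merged_trans merged_idx_to_label (transitions_str_labeled merged_trans merged_idx_to_label)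

-- ===== LEMMAS AND PROOFS =====

-- A's line-building loop is an append-map
theorem foldl_append_singleton {α β : Type} (f : α → β) (l : List α) (acc : List β) :
    l.foldl (fun a x => a ++ [f x]) acc = acc ++ l.map f := by
  induction l generalizing acc with
  | nil => simp
  | cons x xs ih => simp [ih]

-- A's defaultdict value at i is B's filtering pass
theorem by_src_getD (ts : List ((Int × String) × Int)) (i : Int) :
    (ts.foldl (fun d t => d.modify t.1.1 [] (fun l => l ++ [(t.1.2, t.2)])) PySem.Dict.empty).getD i []
      = (ts.filter (fun t => t.1.1 == i)).map (fun t => (t.1.2, t.2)) := by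
  have h : ts.foldl (fun d t => d.modify t.1.1 [] (fun l => l ++ [(t.1.2, t.2)])) PySem.Dict.empty
      = (ts.map (fun t => (t.1.1, (t.1.2, t.2)))).foldl (fun d p => d.modify p.1 [] (fun l => l ++ [p.2])) PySem.Dict.empty := by
    rw [List.foldl_map]
  rw [h, PySem.Dict.getD_foldl_modify_append, PySem.Dict.getD_empty, List.filter_map]
  simp [Function.comp_def]

-- A's key set is B's source set
theorem by_src_keys (ts : List ((Int × String) × Int)) :
    (ts.foldl (fun d t => d.modify t.1.1 [] (fun l => l ++ [(t.1.2, t.2)])) PySem.Dict.empty).keys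
      = PySem.Set.ofList (ts.map (fun t => t.1.1)) := by
  rw [PySem.Dict.keys_foldl_modify_key]
  rw [PySem.Dict.keys_empty, PySem.Set.update_nil_left]

-- ===== VERDICT (by name: the statement is the Claim_ definition above) =====
theorem transitions_str_labeled_spec : Claim_equal_transitions_str_labeled := by
  intro mt lab _ _
  unfold Spec_transitions_str_labeled transitions_str_labeled transitions_str_labeled_alt
  simp only [foldl_append_singleton, by_src_keys, by_src_getD, pvMovesFor, List.singleton_append]
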